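-- pv_equiv track=rewrite | github.com/homebrew9/leetcode_solutions | algorithms/easy/minimum_number_of_flips_to_reverse_binary_string.py | minimumFlips
-- ===== SOURCE A (Python) =====
-- def minimumFlips(n: int) -> int:
--     s = bin(n)[2:]
--     rev = s[::-1]
--     res = 0
--     for a, b in zip(s, rev):
--         if a != b:
--             res += 1
--     return res
-- ===== SOURCE B (Python) =====
-- def minimumFlips(n: int) -> int:
--     # Bit-arithmetic: build the bit-reversal r of n, then popcount(n ^ r).
--     r = 0
--     x = n
--     for _ in range(n.bit_length()):
--         r = (r << 1) | (x & 1)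
--         x >>= 1
--     return bin(n ^ r).count('1')
-- ===== Notes on version B (the rewrite author's own statement) =====
-- stated objective: alternative
-- what changed: B drops the string comparison entirely: it builds the bit-reversal r of n with shift/mask arithmetic and returns popcount(n ^ r), instead of A's per-position comparison of the bin string against its reversed copy.
-- outside the precondition, e.g. on minimumFlips(-2): A returns 2, B returns 1
import Mathlib
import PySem

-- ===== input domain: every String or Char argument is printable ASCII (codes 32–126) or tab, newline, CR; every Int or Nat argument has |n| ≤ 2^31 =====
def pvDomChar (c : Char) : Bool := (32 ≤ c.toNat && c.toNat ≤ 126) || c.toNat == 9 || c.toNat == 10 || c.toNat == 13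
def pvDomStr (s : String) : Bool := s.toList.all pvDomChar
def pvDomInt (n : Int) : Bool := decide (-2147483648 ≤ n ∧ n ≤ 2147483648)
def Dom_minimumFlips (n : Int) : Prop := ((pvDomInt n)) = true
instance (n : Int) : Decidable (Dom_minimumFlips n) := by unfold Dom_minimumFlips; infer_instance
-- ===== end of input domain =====

-- B replaces A's string comparison (bin string vs its reversal, one mismatch per position)
-- by integer bit arithmetic: build the bit-reversal r of n with shifts, then popcount(n ^ r).

-- ===== PORT A =====

-- binary digits of a Nat, most significant first ([] for 0)
def binDigits (n : Nat) : List Char :=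
  if h : n = 0 then []
  else binDigits (n / 2) ++ [if n % 2 = 1 then '1' else '0']
decreasing_by exact Nat.div_lt_self (Nat.pos_of_ne_zero h) (by norm_num)

-- exact model of Python's bin(n) as a character list: '-0b…' for n < 0, '0b…' otherwise, bin(0) = "0b0"
def pyBin (n : Int) : List Char :=
  if n < 0 then '-' :: '0' :: 'b' :: binDigits (-n).toNat
  else '0' :: 'b' :: (if n = 0 then ['0'] else binDigits n.toNat)

def minimumFlips (n : Int) : Int :=
  let s := (pyBin n).drop 2          -- bin(n)[2:]
  let rev := s.reverse               -- s[::-1]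
  (s.zip rev).foldl (fun res p => if p.1 ≠ p.2 then res + 1 else res) 0

-- ===== PORT B =====

-- bits of a Nat, least significant first ([] for 0); (bitsOf m).length is m.bit_length()
def bitsOf (m : Nat) : List Bool :=
  if h : m = 0 then []
  else (m % 2 = 1) :: bitsOf (m / 2)
decreasing_by exact Nat.div_lt_self (Nat.pos_of_ne_zero h) (by norm_num)

-- n.bit_length(): Python takes the bit length of |n|
def pyBitLength (n : Int) : Nat := (bitsOf n.natAbs).length

-- the loop body: r = (r << 1) | (x & 1); x >>= 1.  r stays ≥ 0 and x & 1 ∈ {0,1},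
-- so (r << 1) | (x & 1) = 2*r + (x & 1) exactly; x & 1 is PySem.Int.mod x 2 and
-- x >> 1 is PySem.Int.floordiv x 2 (Python floors), exact for every Int.
-- bin(d).count('1') counts '1' characters of bin(d), ported over pyBin.
def minimumFlips_alt (n : Int) : Int :=
  let st := (List.range (pyBitLength n)).foldl
      (fun (p : Int × Int) _ => (2 * p.1 + PySem.Int.mod p.2 2, PySem.Int.floordiv p.2 2))
      (0, n)
  ((pyBin (Int.xor n st.1)).count '1' : Int)

-- ===== PRECONDITION & SPEC =====
-- Pre_ excludes negative n, outside the task's natural domain (n encodes a binary string):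
-- there A's count also compares the leftover 'b' of bin(n) = '-0b…' against the digits,
-- an artefact of the [2:] slice, while B counts mismatches of the two's-complement bits.
def Pre_minimumFlips (n : Int) : Prop := 0 ≤ n
instance (n : Int) : Decidable (Pre_minimumFlips n) := by unfold Pre_minimumFlips; infer_instance
def pvWitness_minimumFlips : Int := (6)

def Spec_minimumFlips (n : Int) (out : Int) : Prop := out = minimumFlips_alt n
instance (n : Int) (out : Int) : Decidable (Spec_minimumFlips n out) := by unfold Spec_minimumFlips; infer_instance

-- ===== CLAIM (what is proved, stated in full; the proofs are below) =====
def Claim_equal_minimumFlips : Prop := ∀ (n : Int), Dom_minimumFlips n → Pre_minimumFlips n → Spec_minimumFlips n (minimumFlips n)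

-- ===== LEMMAS AND PROOFS =====

-- char rendering of one bit
def bchr (b : Bool) : Char := if b then '1' else '0'

theorem binDigits_eq_bitsOf (m : Nat) :
    binDigits m = ((bitsOf m).map bchr).reverse := by
  induction m using Nat.strong_induction_on with
  | _ m ih =>
    by_cases h : m = 0
    · simp [h, binDigits, bitsOf]
    · rw [binDigits, bitsOf]
      simp only [h, dite_false]
      rw [ih (m / 2) (Nat.div_lt_self (Nat.pos_of_ne_zero h) (by norm_num))]
      simp [bchr]

theorem bitsOf_lt (m : Nat) : m < 2 ^ (bitsOf m).length := by
  induction m using Nat.strong_induction_on with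
  | _ m ih =>
    by_cases h : m = 0
    · simp [h, bitsOf]
    · rw [bitsOf]; simp only [h, dite_false, List.length_cons]
      have := ih (m / 2) (Nat.div_lt_self (Nat.pos_of_ne_zero h) (by norm_num))
      omega

theorem bitsOf_getD (m i : Nat) : (bitsOf m).getD i false = m.testBit i := by
  induction m using Nat.strong_induction_on generalizing i with
  | _ m ih =>
    by_cases h : m = 0
    · simp [h, bitsOf]
    · rw [bitsOf]; simp only [h, dite_false]
      cases i with
      | zero =>
        simp [Nat.testBit_zero]
      | succ i =>
        rw [List.getD_cons_succ, Nat.testBit_succ]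
        exact ih (m / 2) (Nat.div_lt_self (Nat.pos_of_ne_zero h) (by norm_num)) i

-- any list is the map of getD over range of its length
theorem list_eq_map_range_getD {α : Type} (l : List α) (d : α) :
    l = (List.range l.length).map (fun i => l.getD i d) := by
  apply List.ext_getElem
  · simp
  · intro i h1 h2
    simp [List.getD_eq_getElem?_getD, List.getElem?_eq_getElem (by simpa using h1)]

-- A's foldl is a countP
theorem foldl_count_one (l : List (Char × Char)) (r : Int) :
    l.foldl (fun res p => if p.1 ≠ p.2 then res + 1 else res) r
      = r + (l.countP (fun p => decide (p.1 ≠ p.2)) : Int) := by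
  induction l generalizing r with
  | nil => simp
  | cons x t ih =>
    simp only [List.foldl_cons, List.countP_cons, ih]
    by_cases h : x.1 = x.2 <;> simp [h] <;> ring

-- B's loop: folding the body (pyBitLength of a NONNEGATIVE start) computes the big-endian
-- value of the bit list by any index list of the right length
theorem loop_ignores_index {α : Type} (l : List α) (st : Int × Int) :
    (l.foldl (fun (p : Int × Int) _ => (2 * p.1 + PySem.Int.mod p.2 2, PySem.Int.floordiv p.2 2)) st)
      = (l.length).iterate (fun (p : Int × Int) => (2 * p.1 + PySem.Int.mod p.2 2, PySem.Int.floordiv p.2 2)) st := by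
  induction l generalizing st with
  | nil => rfl
  | cons a t ih =>
    simp only [List.foldl_cons, List.length_cons, Function.iterate_succ_apply]
    exact ih _

-- value of a bit list read big-endian, with accumulator
def revVal (l : List Bool) (a : Nat) : Nat :=
  l.foldl (fun r b => 2 * r + (if b then 1 else 0)) a

theorem revVal_cons (b : Bool) (t : List Bool) (a : Nat) :
    revVal (b :: t) a = revVal t (2 * a + (if b then 1 else 0)) := rfl

theorem revVal_acc (l : List Bool) (a : Nat) :
    revVal l a = a * 2 ^ l.length + revVal l 0 := by
  induction l generalizing a with
  | nil => simp [revVal]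
  | cons b t ih =>
    rw [revVal_cons, revVal_cons, ih, ih (2 * 0 + _)]
    cases b <;> simp [List.length_cons, pow_succ] <;> ring

theorem revVal_lt (l : List Bool) : revVal l 0 < 2 ^ l.length := by
  induction l with
  | nil => simp [revVal]
  | cons b t ih =>
    rw [revVal_cons, revVal_acc]
    have : (if b then 1 else 0) ≤ 1 := by split <;> omega
    simp only [List.length_cons, pow_succ]
    nlinarith [pow_pos (show 0 < 2 by norm_num) t.length]

-- the iterated body on (0, ↑m) computes (revVal of m's bits, 0) in Nat terms
theorem iterate_body (m : Nat) (a : Nat) :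
    ((bitsOf m).length).iterate
        (fun (p : Int × Int) => (2 * p.1 + PySem.Int.mod p.2 2, PySem.Int.floordiv p.2 2))
        ((a : Int), (m : Int))
      = ((revVal (bitsOf m) a : Int), ((0 : Nat) : Int)) := by
  induction m using Nat.strong_induction_on generalizing a with
  | _ m ih =>
    by_cases h : m = 0
    · simp [h, bitsOf, revVal]
    · rw [bitsOf]; simp only [h, dite_false, List.length_cons]
      rw [Function.iterate_succ_apply]
      have hmod : PySem.Int.mod (m : Int) 2 = ((m % 2 : Nat) : Int) := by
        simp [PySem.Int.mod, Int.fmod_eq_emod]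
      have hdiv : PySem.Int.floordiv (m : Int) 2 = ((m / 2 : Nat) : Int) := by
        simp [PySem.Int.floordiv, Int.fdiv_eq_ediv]
      have hacc : 2 * (a : Int) + ((m % 2 : Nat) : Int)
          = ((2 * a + (if m % 2 = 1 then 1 else 0) : Nat) : Int) := by
        push_cast; split <;> omega
      rw [hmod, hdiv, hacc, ih (m / 2) (Nat.div_lt_self (Nat.pos_of_ne_zero h) (by norm_num))]
      rw [revVal_cons]
      simp

-- bits of the reversed value: testBit (revVal l 0) i = l.getD (l.length - 1 - i) false for i < length
theorem testBit_revVal (l : List Bool) (i : Nat) (hi : i < l.length) :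
    (revVal l 0).testBit i = l.getD (l.length - 1 - i) false := by
  induction l with
  | nil => simp at hi
  | cons b t ih =>
    rw [revVal_cons, revVal_acc]
    have hlt := revVal_lt t
    rcases Nat.lt_or_ge i t.length with h | h
    · have hb : 2 * 0 + (if b then 1 else 0) = (if b then 1 else 0) := by omega
      rw [hb, mul_comm, Nat.testBit_two_pow_mul_add _ hlt, if_pos h, ih h]
      have : (b :: t).length - 1 - i = (t.length - 1 - i) + 1 := by
        simp only [List.length_cons]; omega
      rw [this, List.getD_cons_succ]
    · have hieq : i = t.length := by simp only [List.length_cons] at hi; omega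
      subst hieq
      have hb : 2 * 0 + (if b then 1 else 0) = (if b then 1 else 0) := by omega
      rw [hb, mul_comm, Nat.testBit_two_pow_mul_add _ hlt, if_neg (lt_irrefl _)]
      have : (b :: t).length - 1 - t.length = 0 := by simp
      rw [this, Nat.sub_self, List.getD_cons_zero]
      cases b <;> simp [Nat.testBit_zero]

-- count of '1' characters in binDigits = count of true bits
theorem count_one_binDigits (m : Nat) :
    (binDigits m).count '1' = (bitsOf m).countP (fun b => b) := by
  rw [binDigits_eq_bitsOf, List.count_eq_countP, List.countP_reverse, List.countP_map]
  apply List.countP_congr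
  intro b _
  cases b <;> simp [bchr]

theorem bitsOf_length_le (x K : Nat) (h : x < 2 ^ K) : (bitsOf x).length ≤ K := by
  induction x using Nat.strong_induction_on generalizing K with
  | _ x ih =>
    by_cases h0 : x = 0
    · simp [h0, bitsOf]
    · rw [bitsOf]; simp only [h0, dite_false, List.length_cons]
      have hK : 1 ≤ K := by
        by_contra hc
        interval_cases K <;> omega
      have hx2 : x / 2 < 2 ^ (K - 1) := by
        have : 2 ^ K = 2 * 2 ^ (K - 1) := by
          conv_lhs => rw [show K = (K - 1) + 1 by omega]
          ring
        omega
      have := ih (x / 2) (Nat.div_lt_self (Nat.pos_of_ne_zero h0) (by norm_num)) (K - 1) hx2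
      omega

-- countP over bits as countP over range of testBit, padded to any K ≥ length
theorem countP_bits_range (d K : Nat) (hK : (bitsOf d).length ≤ K) :
    (bitsOf d).countP (fun b => b) = (List.range K).countP (fun i => d.testBit i) := by
  have h1 : (bitsOf d).countP (fun b => b)
      = (List.range (bitsOf d).length).countP (fun i => (bitsOf d).getD i false) := by
    conv_lhs => rw [list_eq_map_range_getD (bitsOf d) false]
    rw [List.countP_map]; rfl
  rw [h1]
  have h2 : (List.range (bitsOf d).length).countP (fun i => (bitsOf d).getD i false)
      = (List.range (bitsOf d).length).countP (fun i => d.testBit i) := by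
    apply List.countP_congr; intro i _; rw [bitsOf_getD]
  rw [h2]
  have hKeq : K = (bitsOf d).length + (K - (bitsOf d).length) := by omega
  rw [hKeq, List.range_add, List.countP_append, List.countP_map]
  have hz : (List.range (K - (bitsOf d).length)).countP
      ((fun i => d.testBit i) ∘ fun x => (bitsOf d).length + x) = 0 := by
    rw [List.countP_eq_zero]
    intro i _
    have hle : (bitsOf d).length ≤ (bitsOf d).length + i := by omega
    have hd : d < 2 ^ ((bitsOf d).length + i) := lt_of_lt_of_le (bitsOf_lt d)
      (Nat.pow_le_pow_right (by norm_num) hle)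
    simp [Nat.testBit_lt_two_pow hd]
  omega

-- xor of nonneg Ints is Nat xor
theorem int_xor_natCast (a b : Nat) : Int.xor (a : Int) (b : Int) = ((a ^^^ b : Nat) : Int) := rfl

-- main bit-level identity: A's mismatch count over s vs s.reverse equals popcount(m ^^^ revVal)
theorem main_count (m : Nat) :
    (((binDigits m).zip (binDigits m).reverse).countP (fun p => decide (p.1 ≠ p.2)) : Nat)
      = (bitsOf (m ^^^ revVal (bitsOf m) 0)).countP (fun b => b) := by
  set B := bitsOf m with hB
  set L := B.length with hL
  set r := revVal B 0 with hr
  -- left side to range form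
  have hsrev : (binDigits m).reverse = B.map bchr := by
    rw [binDigits_eq_bitsOf, List.reverse_reverse]
  have hs : binDigits m = (B.reverse).map bchr := by
    rw [binDigits_eq_bitsOf, ← List.map_reverse]
  have hzip : (binDigits m).zip (binDigits m).reverse
      = (B.reverse.zip B).map (Prod.map bchr bchr) := by
    rw [hs]
    rw [show (List.map bchr B.reverse).reverse = List.map bchr B from by
      rw [← List.map_reverse, List.reverse_reverse]]
    exact List.zip_map
  have hchr : ∀ x y : Bool, (bchr x ≠ bchr y) ↔ (x ≠ y) := by
    intro x y; cases x <;> cases y <;> simp [bchr]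
  have hleft : ((binDigits m).zip (binDigits m).reverse).countP (fun p => decide (p.1 ≠ p.2))
      = (B.reverse.zip B).countP (fun q => decide (q.1 ≠ q.2)) := by
    rw [hzip, List.countP_map]
    apply List.countP_congr
    intro q _
    simp [Prod.map, hchr]
  rw [hleft]
  -- zip to range form
  have hlen : (B.reverse.zip B).length = L := by
    rw [List.length_zip, List.length_reverse, Nat.min_self]
  have hz2 : (B.reverse.zip B).countP (fun q => decide (q.1 ≠ q.2))
      = (List.range L).countP (fun i => decide (B.getD (L - 1 - i) false ≠ B.getD i false)) := by
    conv_lhs => rw [list_eq_map_range_getD (B.reverse.zip B) (false, false)]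
    rw [List.countP_map, hlen]
    apply List.countP_congr
    intro i hiM
    have hi : i < L := List.mem_range.mp hiM
    have hizip : i < (B.reverse.zip B).length := by omega
    have hiB : i < B.length := by omega
    have : (B.reverse.zip B).getD i (false, false) = (B.getD (L - 1 - i) false, B.getD i false) := by
      rw [List.getD_eq_getElem _ _ hizip, List.getElem_zip]
      rw [List.getD_eq_getElem B false (show L - 1 - i < B.length by omega),
          List.getD_eq_getElem B false hiB]
      rw [Prod.mk.injEq]
      constructor
      · rw [List.getElem_reverse]
      · rfl
    simp only [Function.comp_apply, this]
  rw [hz2]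
  -- right side
  have hrlt : r < 2 ^ L := revVal_lt B
  have hmlt : m < 2 ^ L := bitsOf_lt m
  have hxlt : m ^^^ r < 2 ^ L := Nat.xor_lt_two_pow hmlt hrlt
  have hxlen : (bitsOf (m ^^^ r)).length ≤ L := bitsOf_length_le _ L hxlt
  rw [countP_bits_range (m ^^^ r) L hxlen]
  apply List.countP_congr
  intro i hiM
  have hi : i < L := List.mem_range.mp hiM
  rw [Nat.testBit_xor, ← bitsOf_getD, testBit_revVal B i (by omega), ← hB, ← hL]
  cases hbi : B.getD i false <;> cases hbj : B.getD (L - 1 - i) false <;> simp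

-- ===== VERDICT (by name: the statement is the Claim_ definition above) =====
theorem minimumFlips_spec : Claim_equal_minimumFlips := by
  intro n _ hpre
  unfold Spec_minimumFlips minimumFlips minimumFlips_alt
  by_cases h0 : n = 0
  · subst h0
    have hb0 : bitsOf 0 = [] := by rw [bitsOf]; simp
    simp [pyBin, pyBitLength, hb0]
  · obtain ⟨m, rfl⟩ := Int.eq_ofNat_of_zero_le hpre
    have hm : m ≠ 0 := by
      intro h; exact h0 (by simp [h])
    have hpos : ¬ ((m : Int) < 0) := by omega
    have hsA : (pyBin (m : Int)).drop 2 = binDigits m := by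
      simp [pyBin, hpos, hm]
    rw [hsA, foldl_count_one]
    have hbl : pyBitLength (m : Int) = (bitsOf m).length := by
      simp [pyBitLength]
    rw [hbl, loop_ignores_index, List.length_range]
    have h00 : ((0 : Int), (m : Int)) = (((0 : Nat) : Int), ((m : Nat) : Int)) := by norm_num
    rw [h00, iterate_body m 0]
    simp only [int_xor_natCast]
    set d := m ^^^ revVal (bitsOf m) 0 with hd
    have hcount : (pyBin ((d : Nat) : Int)).count '1' = (bitsOf d).countP (fun b => b) := by
      have hdn : ¬ (((d : Nat) : Int) < 0) := by omega
      by_cases hdz : d = 0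
      · simp [pyBin, hdz, bitsOf]
      · have hdz' : ((d : Nat) : Int) ≠ 0 := by exact_mod_cast hdz
        simp only [pyBin, if_neg hdn, if_neg hdz', Int.toNat_natCast]
        rw [show ('0' :: 'b' :: binDigits d).count '1' = (binDigits d).count '1' by
          simp]
        exact count_one_binDigits d
    rw [hcount, ← main_count m]
    norm_num
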